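-- pv_equiv track=rewrite | github.com/Nurullokh/craking-the-coding-interview | chapter-2/cowardly_rooks.py | move_exactly_one
-- ===== SOURCE A (Python) =====
-- def move_exactly_one(coordinates, n, m):
--     if n <= m:
--         return "NO"
--     if m == 0:
--         return "NO"
--
--     coordinates_x = {}
--     coordinates_y = {}
--     for coordinate in coordinates:
--         if coordinate[0] in coordinates_x:
--             return "NO"
--         else:
--             coordinates_x[coordinate[0]] = 1
--     for coordinate in coordinates:
--         if coordinate[1] in coordinates_y:
--             return "NO"
--         else:
--             coordinates_y[coordinate[1]] = 1
--     return "YES"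
-- ===== SOURCE B (Python) =====
-- def move_exactly_one(coordinates, n, m):
--     if n <= m:
--         return "NO"
--     if m == 0:
--         return "NO"
--     xs = sorted(c[0] for c in coordinates)
--     ys = sorted(c[1] for c in coordinates)
--     if any(a == b for a, b in zip(xs, xs[1:])):
--         return "NO"
--     if any(a == b for a, b in zip(ys, ys[1:])):
--         return "NO"
--     return "YES"
-- ===== Notes on version B (the rewrite author's own statement) =====
-- stated objective: alternative
-- what changed: Duplicate detection is done by sorting each coordinate axis and scanning adjacent pairs for an equal neighbour, instead of A's hash-table membership loops with early return.
import Mathlib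
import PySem

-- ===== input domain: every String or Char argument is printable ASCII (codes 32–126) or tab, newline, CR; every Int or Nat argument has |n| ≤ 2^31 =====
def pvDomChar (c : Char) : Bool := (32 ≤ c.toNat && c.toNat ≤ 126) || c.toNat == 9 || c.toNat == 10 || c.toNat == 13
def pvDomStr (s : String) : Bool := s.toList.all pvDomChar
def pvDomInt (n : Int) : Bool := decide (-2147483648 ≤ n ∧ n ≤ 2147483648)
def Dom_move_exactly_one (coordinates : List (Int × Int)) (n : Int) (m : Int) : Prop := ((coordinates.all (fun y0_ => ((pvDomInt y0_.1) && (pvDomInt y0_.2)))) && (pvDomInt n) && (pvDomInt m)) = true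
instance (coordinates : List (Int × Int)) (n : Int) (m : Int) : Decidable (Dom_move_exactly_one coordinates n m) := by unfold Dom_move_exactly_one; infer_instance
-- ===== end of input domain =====

-- B detects duplicate rows/columns by sorting each axis and scanning adjacent pairs, instead of A's dict-membership loops with early return (alternative algorithm, same result).


-- ===== PORT A =====
-- A's 'for coordinate in coordinates: if coordinate[proj] in seen: return "NO" else seen[...]=1'
-- as a recursive scan over the list carrying the dict; returns true iff the loop hit 'return "NO"'.
def dupScan (proj : Int × Int → Int) (l : List (Int × Int)) (seen : PySem.Dict Int Int) : Bool :=
  match l with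
  | [] => false
  | c :: rest =>
      if seen.contains (proj c) then true
      else dupScan proj rest (seen.insert (proj c) 1)

def move_exactly_one (coordinates : List (Int × Int)) (n : Int) (m : Int) : String :=
  if n ≤ m then "NO"
  else if m = 0 then "NO"
  else if dupScan (fun c => c.1) coordinates PySem.Dict.empty then "NO"
  else if dupScan (fun c => c.2) coordinates PySem.Dict.empty then "NO"
  else "YES"

-- ===== PORT B =====
-- 'any(a == b for a, b in zip(l, l[1:]))'
def hasAdjEq (l : List Int) : Bool := (l.zip l.tail).any (fun p => p.1 == p.2)

def move_exactly_one_alt (coordinates : List (Int × Int)) (n : Int) (m : Int) : String :=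
  if n ≤ m then "NO"
  else if m = 0 then "NO"
  else
    let xs := PySem.List.sorted (coordinates.map (fun c => c.1)) (fun x => x) false
    let ys := PySem.List.sorted (coordinates.map (fun c => c.2)) (fun x => x) false
    if hasAdjEq xs then "NO"
    else if hasAdjEq ys then "NO"
    else "YES"

-- ===== PRECONDITION & SPEC =====
def Spec_move_exactly_one (coordinates : List (Int × Int)) (n : Int) (m : Int) (out : String) : Prop := out = move_exactly_one_alt coordinates n m
instance (coordinates : List (Int × Int)) (n : Int) (m : Int) (out : String) : Decidable (Spec_move_exactly_one coordinates n m out) := by unfold Spec_move_exactly_one; infer_instance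

-- ===== CLAIM =====
def Claim_equal_move_exactly_one : Prop := ∀ (coordinates : List (Int × Int)) (n : Int) (m : Int), Dom_move_exactly_one coordinates n m → Spec_move_exactly_one coordinates n m (move_exactly_one coordinates n m)

-- ===== LEMMAS AND PROOFS =====

-- A's loop finds no duplicate iff the projected values are distinct and none is already in 'seen'.
theorem dupScan_false_iff (proj : Int × Int → Int) (l : List (Int × Int))
    (seen : PySem.Dict Int Int) :
    dupScan proj l seen = false ↔
      (l.map proj).Nodup ∧ ∀ c ∈ l, ¬ seen.contains (proj c) = true := by
  induction l generalizing seen with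
  | nil => simp [dupScan]
  | cons c rest ih =>
      simp only [dupScan, List.map_cons, List.nodup_cons, List.mem_cons, List.mem_map]
      by_cases h : seen.contains (proj c) = true
      · simp only [h, if_true, Bool.true_eq_false, false_iff]
        rintro ⟨-, hall⟩
        exact hall c (Or.inl rfl) h
      · rw [if_neg h, ih]
        constructor
        · rintro ⟨hnd, hall⟩
          refine ⟨⟨?_, hnd⟩, ?_⟩
          · rintro ⟨d, hd, hde⟩
            have := hall d hd
            simp [hde] at this
          · rintro d (rfl | hd)
            · exact h
            · intro hc
              have := hall d hd
              simp [PySem.Dict.contains_insert] at this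
              simp [this.2] at hc
        · rintro ⟨⟨hnotin, hnd⟩, hall⟩
          refine ⟨hnd, ?_⟩
          intro d hd
          simp only [PySem.Dict.contains_insert]
          intro hc
          rcases Bool.or_eq_true_iff.mp hc with h1 | h2
          · exact hnotin ⟨d, hd, beq_iff_eq.mp h1⟩
          · exact hall d (Or.inr hd) h2

theorem dupScan_empty_false_iff (proj : Int × Int → Int) (l : List (Int × Int)) :
    dupScan proj l PySem.Dict.empty = false ↔ (l.map proj).Nodup := by
  rw [dupScan_false_iff]
  simp [PySem.Dict.contains_empty]

-- the zip-with-the-tail scan finds no equal neighbours iff adjacent elements are pairwise distinct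
theorem hasAdjEq_false_iff (l : List Int) :
    hasAdjEq l = false ↔ List.IsChain (· ≠ ·) l := by
  induction l with
  | nil => simp [hasAdjEq]
  | cons a t ih =>
      cases t with
      | nil => simp [hasAdjEq]
      | cons b t' =>
          simp only [hasAdjEq, List.tail_cons, List.zip_cons_cons, List.any_cons,
            List.isChain_cons_cons, Bool.or_eq_false_iff] at *
          rw [ih]
          simp [beq_eq_false_iff_ne]

theorem chain'_lt_of_le_ne (l : List Int) :
    l.IsChain (· ≤ ·) → l.IsChain (· ≠ ·) → l.IsChain (· < ·) := by
  induction l with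
  | nil => intro _ _; simp
  | cons a t ih =>
      cases t with
      | nil => intro _ _; simp
      | cons b t' =>
          simp only [List.isChain_cons_cons]
          rintro ⟨hle, hle'⟩ ⟨hne, hne'⟩
          exact ⟨lt_of_le_of_ne hle hne, ih hle' hne'⟩

-- on a (weakly) sorted list, no equal neighbours ⟺ no duplicates at all
theorem sorted_chain'_ne_iff_nodup (l : List Int) (hp : l.Pairwise (· ≤ ·)) :
    List.IsChain (· ≠ ·) l ↔ l.Nodup := by
  constructor
  · intro hch
    have hlt : l.IsChain (· < ·) := chain'_lt_of_le_ne l hp.isChain hch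
    have : l.Pairwise (· < ·) := List.isChain_iff_pairwise.mp hlt
    exact this.imp ne_of_lt
  · intro hnd
    exact (List.pairwise_iff_forall_sublist.mpr
      (fun h => List.pairwise_iff_forall_sublist.mp hnd h)).isChain

theorem hasAdjEq_sorted_iff (xs : List Int) :
    hasAdjEq (PySem.List.sorted xs (fun x => x) false) = false ↔ xs.Nodup := by
  rw [hasAdjEq_false_iff]
  have hp : (PySem.List.sorted xs (fun x => x) false).Pairwise (· ≤ ·) := by
    have := PySem.List.sorted_pairwise (xs := xs) (key := fun x => x)
    exact this
  rw [sorted_chain'_ne_iff_nodup _ hp]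
  exact (PySem.List.sorted_perm (xs := xs) (key := fun x => x) (rev := false)).nodup_iff

-- ===== VERDICT =====
theorem move_exactly_one_spec : Claim_equal_move_exactly_one := by
  intro coordinates n m _hdom
  unfold Spec_move_exactly_one move_exactly_one move_exactly_one_alt
  by_cases h1 : n ≤ m
  · simp [h1]
  · by_cases h2 : m = 0
    · simp [h2]
    · simp only [h1, h2, if_false]
      have hx := dupScan_empty_false_iff (fun c => c.1) coordinates
      have hy := dupScan_empty_false_iff (fun c => c.2) coordinates
      have hx' := hasAdjEq_sorted_iff (coordinates.map (fun c => c.1))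
      have hy' := hasAdjEq_sorted_iff (coordinates.map (fun c => c.2))
      by_cases hdx : dupScan (fun c => c.1) coordinates PySem.Dict.empty = true
      · have : ¬ (coordinates.map (fun c => c.1)).Nodup := by
          intro hnd; rw [← hx] at hnd; simp [hdx] at hnd
        have hA : hasAdjEq (PySem.List.sorted (coordinates.map (fun c => c.1)) (fun x => x) false) = true := by
          cases hv : hasAdjEq (PySem.List.sorted (coordinates.map (fun c => c.1)) (fun x => x) false)
          · exact absurd (hx'.mp hv) this
          · rfl
        simp [hdx, hA]
      · have hndx : (coordinates.map (fun c => c.1)).Nodup := hx.mp (by simpa using hdx)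
        have hA : hasAdjEq (PySem.List.sorted (coordinates.map (fun c => c.1)) (fun x => x) false) = false := hx'.mpr hndx
        by_cases hdy : dupScan (fun c => c.2) coordinates PySem.Dict.empty = true
        · have : ¬ (coordinates.map (fun c => c.2)).Nodup := by
            intro hnd; rw [← hy] at hnd; simp [hdy] at hnd
          have hB : hasAdjEq (PySem.List.sorted (coordinates.map (fun c => c.2)) (fun x => x) false) = true := by
            cases hv : hasAdjEq (PySem.List.sorted (coordinates.map (fun c => c.2)) (fun x => x) false)
            · exact absurd (hy'.mp hv) this
            · rfl
          simp [hdx, hdy, hA, hB]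
        · have hndy : (coordinates.map (fun c => c.2)).Nodup := hy.mp (by simpa using hdy)
          have hB : hasAdjEq (PySem.List.sorted (coordinates.map (fun c => c.2)) (fun x => x) false) = false := hy'.mpr hndy
          simp [hdx, hdy, hA, hB]
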